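-- pv_equiv track=rewrite | github.com/bobkatla/PythonTesting | FB/quali_round/B_fb/main.py | solution
-- ===== SOURCE A (Python) =====
-- def solution(cells):
--     n = len(cells)
--     min_X = None
--     possible_sets = None
--     # check for row cases
--     for i in range(n):
--         check_min_X = 0
--         can_win = True
--         for j in range(n):
--             c = cells[i][j]
--             if c == 'O' or (min_X is not None and check_min_X > min_X):
--                 can_win = False
--                 break
--             elif c == '.':
--                 check_min_X += 1
--                 check_col_win = True
--                 for a in range(n):
--                     if a != i and cells[a][j] != 'X':
--                         check_col_win = False
--                         break
--                 if check_col_win: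
--                     can_win = False
--                     break
--
--         if can_win:
--             if min_X is None or check_min_X < min_X:
--                 min_X = check_min_X
--                 possible_sets = 1
--             elif check_min_X == min_X:
--                 possible_sets += 1
--     # check for col cases
--     for i in range(n):
--         check_min_X = 0
--         can_win = True
--         for j in range(n):
--             c = cells[j][i]
--             if c == 'O' or (min_X is not None and check_min_X > min_X):
--                 can_win = False
--                 break
--             elif c == '.':
--                 check_min_X += 1
--         if can_win:
--             if min_X is None or check_min_X < min_X:
--                 min_X = check_min_X
--                 possible_sets = 1
--             elif check_min_X == min_X:
--                 possible_sets += 1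
--     return min_X, possible_sets
-- ===== SOURCE B (Python) =====
-- def solution(cells):
--     n = len(cells)
--     # per-column count of non-'X' cells (computed once: removes A's inner O(n) column scan)
--     col_nonX = [sum(1 for a in range(n) if cells[a][j] != 'X') for j in range(n)]
--     candidates = []
--     for i in range(n):
--         row = cells[i]
--         if any(row[j] == 'O' for j in range(n)):
--             continue
--         dots = [j for j in range(n) if row[j] == '.']
--         if any(col_nonX[j] == 1 for j in dots):
--             continue
--         candidates.append(len(dots))
--     for i in range(n):
--         col = [cells[j][i] for j in range(n)]
--         if 'O' in col:
--             continue
--         candidates.append(col.count('.'))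
--     if not candidates:
--         return None, None
--     m = min(candidates)
--     return m, candidates.count(m)
-- ===== Notes on version B (the rewrite author's own statement) =====
-- stated objective: alternative
-- what changed: B precomputes one non-'X' count per column so A's per-dot inner column rescan disappears, and replaces A's stateful min/count accumulator (with its pruning break) by collecting the list of winnable-line costs and taking min and count over it.
-- outside the precondition, e.g. on solution([['O', 'O'], ['O']]): A returns (None, None), B raises IndexError
import Mathlib
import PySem

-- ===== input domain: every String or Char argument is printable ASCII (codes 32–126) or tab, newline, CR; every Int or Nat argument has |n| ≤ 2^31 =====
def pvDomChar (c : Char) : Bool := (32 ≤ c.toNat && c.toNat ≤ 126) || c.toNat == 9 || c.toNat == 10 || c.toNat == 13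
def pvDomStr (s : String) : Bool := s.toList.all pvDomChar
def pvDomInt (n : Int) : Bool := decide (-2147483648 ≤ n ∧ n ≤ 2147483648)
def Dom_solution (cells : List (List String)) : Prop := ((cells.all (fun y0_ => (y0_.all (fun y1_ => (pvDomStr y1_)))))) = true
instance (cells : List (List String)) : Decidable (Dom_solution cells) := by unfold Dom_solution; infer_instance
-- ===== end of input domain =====

-- B (alternative algorithm): one precomputed non-'X' count per column replaces A's per-dot
-- inner column rescan, and a min/count over the collected winnable-line costs replaces A's
-- stateful accumulator loop.

-- cells[i][j]: Python list indexing; under Pre_solution every index used is in range, so the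
-- defaults are never reached (where Python would raise IndexError, Pre_solution excludes the input).
def pvCell (cells : List (List String)) (i j : Nat) : String :=
  (cells.getD i []).getD j ""

-- ===== PORT A =====
def pvPrune (minX : Option Int) (acc : Int) : Bool :=
  match minX with | some m => decide (m < acc) | none => false

def pvColWin (cells : List (List String)) (n i j : Nat) : Bool :=
  (List.range n).all (fun a => a == i || pvCell cells a j == "X")
-- 'min_X is not None and check_min_X > min_X'

def pvRowLoop (cells : List (List String)) (n i : Nat) (minX : Option Int) :
    List Nat → Int → Bool × Int
  | [], acc => (true, acc)
  | j :: js, acc =>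
    let c := pvCell cells i j
    if c == "O" || pvPrune minX acc then
      (false, acc)
    else if c == "." then
      if pvColWin cells n i j then (false, acc + 1)
      else pvRowLoop cells n i minX js (acc + 1)
    else pvRowLoop cells n i minX js acc

def pvColLoop (cells : List (List String)) (i : Nat) (minX : Option Int) :
    List Nat → Int → Bool × Int
  | [], acc => (true, acc)
  | j :: js, acc =>
    let c := pvCell cells j i
    if c == "O" || pvPrune minX acc then (false, acc)
    else if c == "." then pvColLoop cells i minX js (acc + 1)
    else pvColLoop cells i minX js acc

def pvUpdate (s : Option Int × Option Int) (r : Bool × Int) : Option Int × Option Int :=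
  if r.1 then
    match s.1 with
    | none => (some r.2, some 1)
    | some m =>
      if r.2 < m then (some r.2, some 1)
      else if r.2 == m then (s.1, s.2.map (· + 1))
      else s
  else s

def solution (cells : List (List String)) : Option Int × Option Int :=
  let n := cells.length
  let s1 := (List.range n).foldl
    (fun s i => pvUpdate s (pvRowLoop cells n i s.1 (List.range n) 0)) (none, none)
  (List.range n).foldl
    (fun s i => pvUpdate s (pvColLoop cells i s.1 (List.range n) 0)) s1

-- ===== PORT B =====
def solution_alt (cells : List (List String)) : Option Int × Option Int :=
  let n := cells.length
  let colNonX : List Int :=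
    (List.range n).map (fun j => ((List.range n).countP (fun a => pvCell cells a j != "X") : Int))
  let cands1 := (List.range n).foldl (fun cs i =>
      let row := cells.getD i []
      if (List.range n).any (fun j => row.getD j "" == "O") then cs
      else
        let dots := (List.range n).filter (fun j => row.getD j "" == ".")
        if dots.any (fun j => colNonX.getD j 0 == 1) then cs
        else cs ++ [(dots.length : Int)]) []
  let cands := (List.range n).foldl (fun cs i =>
      let col := (List.range n).map (fun j => pvCell cells j i)
      if col.contains "O" then cs
      else cs ++ [(PySem.List.count col "." : Int)]) cands1
  match PySem.List.min? cands (fun x => x) with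
  | none => (none, none)
  | some m => (some m, some (PySem.List.count cands m : Int))


-- ===== PRECONDITION & SPEC =====
-- Pre_ excludes ragged grids (some row shorter than len(cells)): on almost all of them Python A
-- raises IndexError; on the few whose early 'O' breaks skip every short access A returns while B raises.
def Pre_solution (cells : List (List String)) : Prop :=
  ∀ row ∈ cells, cells.length ≤ row.length
instance (cells : List (List String)) : Decidable (Pre_solution cells) := by
  unfold Pre_solution; infer_instance

def pvWitness_solution : List (List String) := [["X", "."], [".", "O"]]

def Spec_solution (cells : List (List String)) (out : Option Int × Option Int) : Prop := out = solution_alt cells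
instance (cells : List (List String)) (out : Option Int × Option Int) : Decidable (Spec_solution cells out) := by unfold Spec_solution; infer_instance

-- ===== CLAIM (what is proved, stated in full; the proofs are below) =====
def Claim_equal_solution : Prop := ∀ (cells : List (List String)), Dom_solution cells → Pre_solution cells → Spec_solution cells (solution cells)

-- ===== LEMMAS AND PROOFS =====
def okR (cells : List (List String)) (n i j : Nat) : Bool :=
  !(pvCell cells i j == "O") && !(pvCell cells i j == "." && pvColWin cells n i j)

def rowVal (cells : List (List String)) (n i : Nat) : Option Int :=
  if (List.range n).all (okR cells n i) then
    some ((List.range n).countP (fun j => pvCell cells i j == ".") : Int)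
  else none

def colVal (cells : List (List String)) (n i : Nat) : Option Int :=
  if (List.range n).all (fun j => !(pvCell cells j i == "O")) then
    some ((List.range n).countP (fun j => pvCell cells j i == ".") : Int)
  else none

def updV (s : Option Int × Option Int) (v : Option Int) : Option Int × Option Int :=
  match v with
  | none => s
  | some c => pvUpdate s (true, c)

def F (cs : List Int) : Option Int × Option Int :=
  match PySem.List.min? cs (fun x => x) with
  | none => (none, none)
  | some m => (some m, some (PySem.List.count cs m : Int))

theorem pvRowLoop_true (cells : List (List String)) (n i : Nat) (minX : Option Int) :
    ∀ (js : List Nat) (acc c : Int), pvRowLoop cells n i minX js acc = (true, c) →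
      js.all (okR cells n i) = true ∧ c = acc + (js.countP (fun j => pvCell cells i j == ".") : Int) := by
  intro js
  induction js with
  | nil => intro acc c h; simp [pvRowLoop] at h; simp [h]
  | cons j js ih =>
    intro acc c h
    simp only [pvRowLoop] at h
    split_ifs at h with h1 h2 h3
    · exact absurd h (by simp)
    · exact absurd h (by simp)
    · obtain ⟨ha, hc⟩ := ih (acc + 1) c h
      refine ⟨by simp [okR, List.all_cons, ha, h2, h3]; simp at h1; exact fun hh => absurd hh h1.1, ?_⟩
      simp [List.countP_cons, h2] at hc ⊢
      push_cast at hc ⊢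
      omega
    · obtain ⟨ha, hc⟩ := ih acc c h
      refine ⟨by simp [okR, List.all_cons, ha, h2]; simp at h1; exact fun hh => absurd hh h1.1, ?_⟩
      simp [List.countP_cons, h2] at hc ⊢
      exact hc

theorem pvRowLoop_complete (cells : List (List String)) (n i : Nat) (minX : Option Int) :
    ∀ (js : List Nat) (acc : Int), js.all (okR cells n i) = true →
      (∀ m, minX = some m → acc + (js.countP (fun j => pvCell cells i j == ".") : Int) ≤ m) →
      pvRowLoop cells n i minX js acc =
        (true, acc + (js.countP (fun j => pvCell cells i j == ".") : Int)) := by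
  intro js
  induction js with
  | nil => intro acc _ _; simp [pvRowLoop]
  | cons j js ih =>
    intro acc hall hm
    simp only [List.all_cons, Bool.and_eq_true, okR, Bool.not_eq_true'] at hall
    obtain ⟨⟨hO, hdw⟩, hall⟩ := hall
    have hcond : (pvCell cells i j == "O" || pvPrune minX acc) = false := by
      rw [hO, Bool.false_or]
      cases minX with
      | none => rfl
      | some m =>
        have h1 := hm m rfl
        have h2 : (0:Int) ≤ (List.countP (fun j => pvCell cells i j == ".") (j :: js) : Int) := by positivity
        simp only [pvPrune, decide_eq_false_iff_not, not_lt]; omega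
    simp only [pvRowLoop]
    rw [hcond, if_neg (by simp)]
    by_cases hd : pvCell cells i j == "."
    · have hw : pvColWin cells n i j = false := by simp [hd] at hdw; exact hdw
      rw [if_pos hd, if_neg (by simp [hw])]
      rw [ih (acc+1) hall (by intro m hmm; have := hm m hmm; simp [List.countP_cons, hd] at this ⊢; omega)]
      simp [List.countP_cons, hd]; push_cast; ring_nf
    · rw [if_neg hd, ih acc hall (by intro m hmm; have := hm m hmm; simpa [List.countP_cons, hd] using this)]
      simp [List.countP_cons, hd]

theorem pvColLoop_true (cells : List (List String)) (i : Nat) (minX : Option Int) :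
    ∀ (js : List Nat) (acc c : Int), pvColLoop cells i minX js acc = (true, c) →
      js.all (fun j => !(pvCell cells j i == "O")) = true ∧
        c = acc + (js.countP (fun j => pvCell cells j i == ".") : Int) := by
  intro js
  induction js with
  | nil => intro acc c h; simp [pvColLoop] at h; simp [h]
  | cons j js ih =>
    intro acc c h
    simp only [pvColLoop] at h
    split_ifs at h with h1 h2
    · exact absurd h (by simp)
    · obtain ⟨ha, hc⟩ := ih (acc + 1) c h
      refine ⟨by simp [List.all_cons, ha]; simp at h1; exact fun hh => absurd hh h1.1, ?_⟩
      simp [List.countP_cons, h2] at hc ⊢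
      omega
    · obtain ⟨ha, hc⟩ := ih acc c h
      refine ⟨by simp [List.all_cons, ha]; simp at h1; exact fun hh => absurd hh h1.1, ?_⟩
      simp [List.countP_cons, h2] at hc ⊢
      exact hc

theorem pvColLoop_complete (cells : List (List String)) (i : Nat) (minX : Option Int) :
    ∀ (js : List Nat) (acc : Int), js.all (fun j => !(pvCell cells j i == "O")) = true →
      (∀ m, minX = some m → acc + (js.countP (fun j => pvCell cells j i == ".") : Int) ≤ m) →
      pvColLoop cells i minX js acc =
        (true, acc + (js.countP (fun j => pvCell cells j i == ".") : Int)) := by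
  intro js
  induction js with
  | nil => intro acc _ _; simp [pvColLoop]
  | cons j js ih =>
    intro acc hall hm
    simp only [List.all_cons, Bool.and_eq_true, Bool.not_eq_true'] at hall
    obtain ⟨hO, hall⟩ := hall
    have hcond : (pvCell cells j i == "O" || pvPrune minX acc) = false := by
      rw [hO, Bool.false_or]
      cases minX with
      | none => rfl
      | some m =>
        have h1 := hm m rfl
        have h2 : (0:Int) ≤ (List.countP (fun j => pvCell cells j i == ".") (j :: js) : Int) := by positivity
        simp only [pvPrune, decide_eq_false_iff_not, not_lt]; omega
    simp only [pvColLoop]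
    rw [hcond, if_neg (by simp)]
    by_cases hd : pvCell cells j i == "."
    · rw [if_pos hd, ih (acc+1) hall (by intro m hmm; have := hm m hmm; simp [List.countP_cons, hd] at this ⊢; omega)]
      simp [List.countP_cons, hd]; push_cast; ring_nf
    · rw [if_neg hd, ih acc hall (by intro m hmm; have := hm m hmm; simpa [List.countP_cons, hd] using this)]
      simp [List.countP_cons, hd]

theorem updV_gt (m c : Int) (ps : Option Int) (h : m < c) :
    updV (some m, ps) (some c) = (some m, ps) := by
  simp only [updV, pvUpdate, if_pos]
  rw [if_neg (by omega), if_neg (by simp; omega)]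

theorem rowStep_eq (cells : List (List String)) (n i : Nat) (s : Option Int × Option Int) :
    pvUpdate s (pvRowLoop cells n i s.1 (List.range n) 0) = updV s (rowVal cells n i) := by
  by_cases hok : (List.range n).all (okR cells n i)
  all_goals rcases hL : pvRowLoop cells n i s.1 (List.range n) 0 with ⟨b, c⟩
  · -- the row is winnable with cost cnt
    rcases s with ⟨mo, ps⟩
    rcases mo with _ | m
    · rw [pvRowLoop_complete cells n i none (List.range n) 0 hok (by intro m hm; cases hm)] at hL
      obtain ⟨rfl, rfl⟩ := Prod.mk.injEq .. ▸ hL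
      simp [rowVal, hok, updV]
    · by_cases hcm : ((List.range n).countP (fun j => pvCell cells i j == ".") : Int) ≤ m
      · rw [pvRowLoop_complete cells n i (some m) (List.range n) 0 hok
          (by intro m' hm'; cases hm'; simpa using hcm)] at hL
        obtain ⟨rfl, rfl⟩ := Prod.mk.injEq .. ▸ hL
        simp [rowVal, hok, updV]
      · -- cost > m: both sides leave s unchanged
        rw [not_le] at hcm
        have hval : rowVal cells n i = some ((List.range n).countP (fun j => pvCell cells i j == ".") : Int) := by
          simp [rowVal, hok]
        rw [hval, updV_gt _ _ _ hcm]
        cases b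
        · simp [pvUpdate]
        · obtain ⟨-, hc⟩ := pvRowLoop_true cells n i (some m, ps).1 (List.range n) 0 c hL
          simp only [zero_add] at hc
          subst hc
          simp only [pvUpdate, if_pos]
          rw [if_neg (by omega), if_neg (by simp; omega)]
  · -- not winnable: loop must report false
    have hb : b = false := by
      cases b
      · rfl
      · obtain ⟨ha, -⟩ := pvRowLoop_true cells n i s.1 (List.range n) 0 c hL
        exact absurd ha hok
    subst hb
    simp [pvUpdate, rowVal, hok, updV]

theorem colStep_eq (cells : List (List String)) (n i : Nat) (s : Option Int × Option Int) :
    pvUpdate s (pvColLoop cells i s.1 (List.range n) 0) = updV s (colVal cells n i) := by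
  by_cases hok : (List.range n).all (fun j => !(pvCell cells j i == "O"))
  all_goals rcases hL : pvColLoop cells i s.1 (List.range n) 0 with ⟨b, c⟩
  · rcases s with ⟨mo, ps⟩
    rcases mo with _ | m
    · rw [pvColLoop_complete cells i none (List.range n) 0 hok (by intro m hm; cases hm)] at hL
      obtain ⟨rfl, rfl⟩ := Prod.mk.injEq .. ▸ hL
      simp [colVal, hok, updV]
    · by_cases hcm : ((List.range n).countP (fun j => pvCell cells j i == ".") : Int) ≤ m
      · rw [pvColLoop_complete cells i (some m) (List.range n) 0 hok
          (by intro m' hm'; cases hm'; simpa using hcm)] at hL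
        obtain ⟨rfl, rfl⟩ := Prod.mk.injEq .. ▸ hL
        simp [colVal, hok, updV]
      · rw [not_le] at hcm
        have hval : colVal cells n i = some ((List.range n).countP (fun j => pvCell cells j i == ".") : Int) := by
          simp [colVal, hok]
        rw [hval, updV_gt _ _ _ hcm]
        cases b
        · simp [pvUpdate]
        · obtain ⟨-, hc⟩ := pvColLoop_true cells i (some m, ps).1 (List.range n) 0 c hL
          simp only [zero_add] at hc
          subst hc
          simp only [pvUpdate, if_pos]
          rw [if_neg (by omega), if_neg (by simp; omega)]
  · have hb : b = false := by
      cases b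
      · rfl
      · obtain ⟨ha, -⟩ := pvColLoop_true cells i s.1 (List.range n) 0 c hL
        exact absurd ha hok
    subst hb
    simp [pvUpdate, colVal, hok, updV]

theorem updV_F_append (cs : List Int) (c : Int) :
    updV (F cs) (some c) = F (cs ++ [c]) := by
  rcases cs with _ | ⟨x, t⟩
  · have h0 : PySem.List.min? ([] : List Int) (fun x => x) = none := rfl
    simp [F, h0, updV, pvUpdate, PySem.List.min?_id_cons, PySem.List.count_eq]
  · rw [show (x :: t) ++ [c] = x :: (t ++ [c]) from rfl]
    rw [F, F, PySem.List.min?_id_cons, PySem.List.min?_id_cons]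
    have hmin : List.foldl min x (t ++ [c]) = min (List.foldl min x t) c := by
      rw [List.foldl_append]; rfl
    set m := List.foldl min x t with hm
    have hle : ∀ y ∈ x :: t, m ≤ y :=
      PySem.List.min?_id_le (by rw [PySem.List.min?_id_cons])
    simp only [updV, pvUpdate, if_pos, PySem.List.count_eq]
    have hct : ∀ v : Int, List.count v (x :: (t ++ [c])) = List.count v (x :: t) + List.count v [c] := by
      intro v
      rw [show x :: (t ++ [c]) = (x :: t) ++ [c] from rfl, List.count_append]
    rcases lt_trichotomy c m with h | h | h
    · rw [if_pos h, hmin, min_eq_right h.le]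
      have h0 : List.count c (x :: t) = 0 := by
        rw [List.count_eq_zero]
        intro hmem
        exact absurd (hle c hmem) (by omega)
      simp [hct, h0]
    · rw [if_neg (by omega), if_pos (by simpa using h), hmin, min_eq_left h.ge]
      subst h
      simp [hct]
    · rw [if_neg (by omega), if_neg (by simp; omega), hmin, min_eq_left h.le]
      have hc0 : List.count m [c] = 0 := by
        rw [List.count_eq_zero]
        intro hm2
        simp at hm2
        omega
      simp [hct, hc0]

theorem foldl_updV_F : ∀ (vs : List (Option Int)) (cs : List Int),
    vs.foldl updV (F cs) = F (cs ++ vs.filterMap id) := by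
  intro vs
  induction vs with
  | nil => intro cs; simp
  | cons v vs ih =>
    intro cs
    rcases v with _ | c
    · simpa [updV] using ih cs
    · rw [List.foldl_cons, updV_F_append, ih (cs ++ [c])]
      simp

theorem solution_eq_F (cells : List (List String)) :
    solution cells =
      F (((List.range cells.length).map (rowVal cells cells.length)).filterMap id ++
         ((List.range cells.length).map (colVal cells cells.length)).filterMap id) := by
  simp only [solution]
  rw [show (fun (s : Option Int × Option Int) (i : Nat) =>
        pvUpdate s (pvRowLoop cells cells.length i s.1 (List.range cells.length) 0)) =
      (fun s i => updV s (rowVal cells cells.length i)) from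
    funext fun s => funext fun i => rowStep_eq cells cells.length i s]
  rw [show (fun (s : Option Int × Option Int) (i : Nat) =>
        pvUpdate s (pvColLoop cells i s.1 (List.range cells.length) 0)) =
      (fun s i => updV s (colVal cells cells.length i)) from
    funext fun s => funext fun i => colStep_eq cells cells.length i s]
  have h1 : ∀ (g : Nat → Option Int) (b : Option Int × Option Int) (l : List Nat),
      List.foldl (fun s i => updV s (g i)) b l = List.foldl updV b (l.map g) := by
    intro g b l; rw [List.foldl_map]
  rw [h1, h1, show ((none, none) : Option Int × Option Int) = F [] from rfl,
    foldl_updV_F, foldl_updV_F]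
  simp

theorem list_eq_singleton {α : Type} {l : List α} {a : α}
    (hnd : l.Nodup) (h1 : a ∈ l) (h2 : ∀ b ∈ l, b = a) : l = [a] := by
  rcases l with _ | ⟨x, t⟩
  · simp at h1
  · have hx : x = a := h2 x (by simp)
    subst hx
    rcases t with _ | ⟨y, u⟩
    · rfl
    · have hy : y = x := h2 y (by simp)
      subst hy
      simp at hnd

-- the column precount: with cells[i][j] = '.', completing column j from row i means
-- its non-'X' count is exactly 1

theorem colWin_eq_count_one (cells : List (List String)) (n i j : Nat)
    (hi : i < n) (hd : (pvCell cells i j == ".") = true) :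
    pvColWin cells n i j =
      ((((List.range n).countP (fun a => pvCell cells a j != "X") : Nat) : Int) == 1) := by
  have hpi : (pvCell cells i j != "X") = true := by
    simp only [beq_iff_eq] at hd
    simp [hd]
  have hmem : i ∈ List.range n := List.mem_range.mpr hi
  have hcc : ((((List.range n).countP (fun a => pvCell cells a j != "X") : Nat) : Int) == 1) =
      decide ((List.range n).countP (fun a => pvCell cells a j != "X") = 1) := by
    rcases h : (List.range n).countP (fun a => pvCell cells a j != "X") with _ | _ | k <;> simp [h]
    omega
  rw [hcc, List.countP_eq_length_filter]
  by_cases hw : pvColWin cells n i j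
  · rw [hw]
    have hfil : (List.range n).filter (fun a => pvCell cells a j != "X") = [i] := by
      apply list_eq_singleton (List.Nodup.filter _ (List.nodup_range)) (List.mem_filter.mpr ⟨hmem, hpi⟩)
      intro b hb
      obtain ⟨hbr, hbp⟩ := List.mem_filter.mp hb
      have := (List.all_eq_true.mp hw) b hbr
      simp only [Bool.or_eq_true, beq_iff_eq] at this
      rcases this with h1 | h1
      · simpa using h1
      · simp [h1] at hbp
    simp [hfil]
  · rw [Bool.eq_false_iff.mpr hw] -- hmm
    symm
    simp only [decide_eq_false_iff_not]
    intro hlen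
    apply hw
    obtain ⟨b, hb⟩ := List.length_eq_one_iff.mp hlen
    have hib : i = b := by
      have : i ∈ (List.range n).filter (fun a => pvCell cells a j != "X") :=
        List.mem_filter.mpr ⟨hmem, hpi⟩
      rw [hb] at this
      simpa using this
    subst hib
    rw [pvColWin]
    apply List.all_eq_true.mpr
    intro a har
    by_cases hX : pvCell cells a j == "X"
    · simp [hX]
    · have : a ∈ (List.range n).filter (fun a => pvCell cells a j != "X") :=
        List.mem_filter.mpr ⟨har, by simpa using hX⟩
      rw [hb] at this
      simp at this
      simp [this]

def stepBR (cells : List (List String)) (n : Nat) (cs : List Int) (i : Nat) : List Int :=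
  let row := cells.getD i []
  if (List.range n).any (fun j => row.getD j "" == "O") then cs
  else
    let dots := (List.range n).filter (fun j => row.getD j "" == ".")
    if dots.any (fun j =>
        ((List.range n).map (fun j => ((List.range n).countP (fun a => pvCell cells a j != "X") : Int))).getD j 0 == 1) then cs
    else cs ++ [(dots.length : Int)]

def stepBC (cells : List (List String)) (n : Nat) (cs : List Int) (i : Nat) : List Int :=
  let col := (List.range n).map (fun j => pvCell cells j i)
  if col.contains "O" then cs
  else cs ++ [(PySem.List.count col "." : Int)]

theorem stepBR_eq (cells : List (List String)) (n i : Nat) (hi : i < n) (cs : List Int) :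
    stepBR cells n cs i = cs ++ (rowVal cells n i).toList := by
  simp only [stepBR]
  simp only [show ∀ j, ((cells.getD i []).getD j "") = pvCell cells i j from fun _ => rfl]
  by_cases hA : (List.range n).any (fun j => pvCell cells i j == "O") = true
  · rw [if_pos hA]
    obtain ⟨j, hj, hOj⟩ := List.any_eq_true.mp hA
    have hall : (List.range n).all (okR cells n i) = false := by
      rw [List.all_eq_false]
      exact ⟨j, hj, by simp [okR, hOj]⟩
    simp [rowVal, hall]
  · rw [if_neg hA]
    have hno : ∀ j ∈ List.range n, (pvCell cells i j == "O") = false := by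
      intro j hj
      by_contra hc
      exact hA (List.any_eq_true.mpr ⟨j, hj, by simpa using hc⟩)
    have hpred : ∀ j ∈ (List.range n).filter (fun j => pvCell cells i j == "."),
        (((List.range n).map (fun j => ((List.range n).countP (fun a => pvCell cells a j != "X") : Int))).getD j 0 == 1)
          = pvColWin cells n i j := by
      intro j hj
      obtain ⟨hjr, hjd⟩ := List.mem_filter.mp hj
      rw [PySem.List.getD_map_range _ _ _ _ (List.mem_range.mp hjr)]
      exact (colWin_eq_count_one cells n i j hi hjd).symm
    by_cases hB : ((List.range n).filter (fun j => pvCell cells i j == ".")).any (fun j =>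
        ((List.range n).map (fun j => ((List.range n).countP (fun a => pvCell cells a j != "X") : Int))).getD j 0 == 1) = true
    · rw [if_pos hB]
      obtain ⟨j, hj, hCj⟩ := List.any_eq_true.mp hB
      obtain ⟨hjr, hjd⟩ := List.mem_filter.mp hj
      have hw : pvColWin cells n i j = true := by rw [← hpred j hj]; exact hCj
      have hall : (List.range n).all (okR cells n i) = false := by
        rw [List.all_eq_false]
        exact ⟨j, hjr, by simp [okR, hjd, hw]⟩
      simp [rowVal, hall]
    · rw [if_neg hB]
      have hall : (List.range n).all (okR cells n i) = true := by
        rw [List.all_eq_true]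
        intro j hj
        have hO := hno j hj
        by_cases hd : (pvCell cells i j == ".") = true
        · have hjf : j ∈ (List.range n).filter (fun j => pvCell cells i j == ".") :=
            List.mem_filter.mpr ⟨hj, hd⟩
          have hw : pvColWin cells n i j = false := by
            by_contra hc
            exact hB (List.any_eq_true.mpr ⟨j, hjf, by rw [hpred j hjf]; simpa using hc⟩)
          simp [okR, hO, hw]
        · simp [okR, hO, hd]
      have hlen : ((List.range n).filter (fun j => pvCell cells i j == ".")).length
          = (List.range n).countP (fun j => pvCell cells i j == ".") :=
        (List.countP_eq_length_filter ..).symm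
      simp [rowVal, hall, hlen]

theorem stepBC_eq (cells : List (List String)) (n i : Nat) (cs : List Int) :
    stepBC cells n cs i = cs ++ (colVal cells n i).toList := by
  simp only [stepBC]
  by_cases hA : ((List.range n).map (fun j => pvCell cells j i)).contains "O" = true
  · rw [if_pos hA]
    have hmem : "O" ∈ (List.range n).map (fun j => pvCell cells j i) := by
      simpa using hA
    obtain ⟨j, hj, hOg⟩ := List.mem_map.mp hmem
    have hall : (List.range n).all (fun j => !(pvCell cells j i == "O")) = false := by
      rw [List.all_eq_false]
      exact ⟨j, hj, by simp [hOg]⟩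
    simp [colVal, hall]
  · rw [if_neg hA]
    have hmem : "O" ∉ (List.range n).map (fun j => pvCell cells j i) := by
      intro hc
      exact hA (by simpa using hc)
    have hall : (List.range n).all (fun j => !(pvCell cells j i == "O")) = true := by
      rw [List.all_eq_true]
      intro j hj
      have : pvCell cells j i ≠ "O" := by
        intro he
        exact hmem (List.mem_map.mpr ⟨j, hj, he⟩)
      simp [this]
    have hcnt : List.count "." ((List.range n).map (fun j => pvCell cells j i))
        = (List.range n).countP (fun j => pvCell cells j i == ".") := by
      rw [List.count_eq_countP, List.countP_map]
      rfl
    simp [colVal, hall, PySem.List.count_eq, hcnt]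

theorem foldl_stepBR (cells : List (List String)) (n : Nat) :
    ∀ (l : List Nat) (cs : List Int), (∀ i ∈ l, i < n) →
      l.foldl (stepBR cells n) cs = cs ++ (l.map (rowVal cells n)).filterMap id := by
  intro l
  induction l with
  | nil => intro cs _; simp
  | cons i l ih =>
    intro cs h
    rw [List.foldl_cons, stepBR_eq cells n i (h i (by simp)) cs,
      ih _ (fun x hx => h x (by simp [hx]))]
    rcases hv : rowVal cells n i with _ | c <;> simp [hv]

theorem foldl_stepBC (cells : List (List String)) (n : Nat) :
    ∀ (l : List Nat) (cs : List Int),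
      l.foldl (stepBC cells n) cs = cs ++ (l.map (colVal cells n)).filterMap id := by
  intro l
  induction l with
  | nil => intro cs; simp
  | cons i l ih =>
    intro cs
    rw [List.foldl_cons, stepBC_eq cells n i cs, ih]
    rcases hv : colVal cells n i with _ | c <;> simp [hv]

theorem solution_alt_eq_F (cells : List (List String)) :
    solution_alt cells =
      F (((List.range cells.length).map (rowVal cells cells.length)).filterMap id ++
         ((List.range cells.length).map (colVal cells cells.length)).filterMap id) := by
  have halt : solution_alt cells =
      F ((List.range cells.length).foldl (stepBC cells cells.length)
         ((List.range cells.length).foldl (stepBR cells cells.length) [])) := rfl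
  rw [halt, foldl_stepBR cells cells.length _ _ (fun i hi => List.mem_range.mp hi),
    foldl_stepBC]
  simp

-- ===== VERDICT (by name: the statement is the Claim_ definition above) =====
theorem solution_spec : Claim_equal_solution := by
  intro cells _ _
  unfold Spec_solution
  rw [solution_eq_F, solution_alt_eq_F]
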